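-- pv_equiv track=rewrite | github.com/TheShr/FedCRA | helpers/utils_.py | count_feature_categories
-- ===== SOURCE A (Python) =====
-- from typing import List, Union, Dict, Optional, Any
--
-- def count_feature_categories(input_dict: Dict[str, List[str]]) -> Dict[str, int]:
--     """
--
--     :return:
--     :param input_dict: Input dictionary where keys are the names of the datapoints and values are lists of features.
--     :return: dictionary with the count of each feature category.
--     """
--     categories_count = {
--         'HpHp': 0,
--         'HH': 0,
--         'MI': 0,
--         'H': 0,
--         'HH_jit': 0,
--     }
--
--     for feature_list in input_dict.values():
--         for feature in feature_list:
--             if 'HpHp' in feature: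
--                 categories_count['HpHp'] += 1
--             if 'HH' in feature:
--                 categories_count['HH'] += 1
--             if 'MI' in feature:
--                 categories_count['MI'] += 1
--             if 'H_' in feature:  # This ensures it matches 'H_L0.1_weight', 'H_L1_weight', etc.
--                 categories_count['H'] += 1
--             if 'HH_jit' in feature:
--                 categories_count['HH_jit'] += 1
--
--     return categories_count
-- ===== SOURCE B (Python) =====
-- from typing import List, Dict
--
-- def count_feature_categories(input_dict: Dict[str, List[str]]) -> Dict[str, int]:
--     feats = [f for fl in input_dict.values() for f in fl]
--     return {key: sum(1 for f in feats if sub in f)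
--             for key, sub in (('HpHp', 'HpHp'), ('HH', 'HH'), ('MI', 'MI'),
--                              ('H', 'H_'), ('HH_jit', 'HH_jit'))}
-- ===== Notes on version B (the rewrite author's own statement) =====
-- stated objective: simpler
-- what changed: Replaces the fused double loop that threads a five-counter dict through every feature with a flatten-once pass plus one independent generator-sum per category, building the result dict directly in the same key order.
import Mathlib
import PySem

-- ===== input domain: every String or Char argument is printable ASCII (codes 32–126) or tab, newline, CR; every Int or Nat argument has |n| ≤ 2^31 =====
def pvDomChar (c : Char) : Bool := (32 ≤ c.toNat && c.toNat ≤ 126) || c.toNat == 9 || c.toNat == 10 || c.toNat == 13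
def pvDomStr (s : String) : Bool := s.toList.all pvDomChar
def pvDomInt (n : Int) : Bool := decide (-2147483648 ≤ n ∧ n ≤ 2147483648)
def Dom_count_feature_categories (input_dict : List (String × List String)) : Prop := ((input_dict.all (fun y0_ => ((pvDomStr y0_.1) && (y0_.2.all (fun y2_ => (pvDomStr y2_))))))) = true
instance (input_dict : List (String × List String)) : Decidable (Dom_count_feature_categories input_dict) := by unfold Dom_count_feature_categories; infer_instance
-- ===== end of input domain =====

-- B replaces A's fused double loop threading a five-counter dict with a flatten-once pass
-- plus one independent count per category (simpler decomposition; same asymptotic cost).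


-- ===== PORT A =====
-- one feature step of A's inner loop: the five 'if sub in feature: count += 1' updates
def pvStepA (d : PySem.Dict String Int) (feature : String) : PySem.Dict String Int :=
  let d := if PySem.Str.isIn "HpHp" feature then d.modify "HpHp" 0 (· + 1) else d
  let d := if PySem.Str.isIn "HH" feature then d.modify "HH" 0 (· + 1) else d
  let d := if PySem.Str.isIn "MI" feature then d.modify "MI" 0 (· + 1) else d
  let d := if PySem.Str.isIn "H_" feature then d.modify "H" 0 (· + 1) else d
  if PySem.Str.isIn "HH_jit" feature then d.modify "HH_jit" 0 (· + 1) else d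

def count_feature_categories (input_dict : List (String × List String)) : List (String × Int) :=
  let categories_count : PySem.Dict String Int :=
    PySem.Dict.ofList [("HpHp", 0), ("HH", 0), ("MI", 0), ("H", 0), ("HH_jit", 0)]
  (input_dict.foldl (fun d kv => kv.2.foldl pvStepA d) categories_count).items

-- ===== PORT B =====
def count_feature_categories_alt (input_dict : List (String × List String)) : List (String × Int) :=
  let feats := input_dict.flatMap (fun kv => kv.2)
  [("HpHp", (feats.countP (fun f => PySem.Str.isIn "HpHp" f) : Int)),
   ("HH",   (feats.countP (fun f => PySem.Str.isIn "HH" f) : Int)),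
   ("MI",   (feats.countP (fun f => PySem.Str.isIn "MI" f) : Int)),
   ("H",    (feats.countP (fun f => PySem.Str.isIn "H_" f) : Int)),
   ("HH_jit", (feats.countP (fun f => PySem.Str.isIn "HH_jit" f) : Int))]

-- ===== PRECONDITION & SPEC =====
def Spec_count_feature_categories (input_dict : List (String × List String)) (out : List (String × Int)) : Prop := out = count_feature_categories_alt input_dict
instance (input_dict : List (String × List String)) (out : List (String × Int)) : Decidable (Spec_count_feature_categories input_dict out) := by unfold Spec_count_feature_categories; infer_instance

-- ===== CLAIM (what is proved, stated in full; the proofs are below) =====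
def Claim_equal_count_feature_categories : Prop := ∀ (input_dict : List (String × List String)), Dom_count_feature_categories input_dict → Spec_count_feature_categories input_dict (count_feature_categories input_dict)

-- ===== LEMMAS AND PROOFS =====
-- the fused nested loop of A equals a single fold over the flattened feature list
theorem pv_foldl_flat (l : List (String × List String)) (d : PySem.Dict String Int) :
    l.foldl (fun d kv => kv.2.foldl pvStepA d) d
      = (l.flatMap (fun kv => kv.2)).foldl pvStepA d := by
  induction l generalizing d with
  | nil => rfl
  | cons kv t ih => simp [List.flatMap_cons, List.foldl_append, ih]

-- one step of A on a dict of the fixed five-key shape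
theorem pv_stepA_shape (a b c h e : Int) (f : String) :
    pvStepA (PySem.Dict.mk [("HpHp", a), ("HH", b), ("MI", c), ("H", h), ("HH_jit", e)]) f
      = PySem.Dict.mk
          [("HpHp", a + if PySem.Str.isIn "HpHp" f then 1 else 0),
           ("HH",   b + if PySem.Str.isIn "HH" f then 1 else 0),
           ("MI",   c + if PySem.Str.isIn "MI" f then 1 else 0),
           ("H",    h + if PySem.Str.isIn "H_" f then 1 else 0),
           ("HH_jit", e + if PySem.Str.isIn "HH_jit" f then 1 else 0)] := by
  unfold pvStepA
  split_ifs <;>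
    simp_all [PySem.Dict.modify, PySem.Dict.getD, PySem.Dict.get?, PySem.Dict.insert]

-- the fold over the flat list accumulates the five independent counts
theorem pv_fold_counts (fs : List String) (a b c h e : Int) :
    (fs.foldl pvStepA
        (PySem.Dict.mk [("HpHp", a), ("HH", b), ("MI", c), ("H", h), ("HH_jit", e)])).items
      = [("HpHp", a + (fs.countP (fun f => PySem.Str.isIn "HpHp" f) : Int)),
         ("HH",   b + (fs.countP (fun f => PySem.Str.isIn "HH" f) : Int)),
         ("MI",   c + (fs.countP (fun f => PySem.Str.isIn "MI" f) : Int)),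
         ("H",    h + (fs.countP (fun f => PySem.Str.isIn "H_" f) : Int)),
         ("HH_jit", e + (fs.countP (fun f => PySem.Str.isIn "HH_jit" f) : Int))] := by
  induction fs generalizing a b c h e with
  | nil => simp
  | cons f t ih =>
      rw [List.foldl_cons, pv_stepA_shape, ih]
      simp only [List.countP_cons, List.cons.injEq, Prod.mk.injEq]
      refine ⟨⟨trivial, ?_⟩, ⟨trivial, ?_⟩, ⟨trivial, ?_⟩, ⟨trivial, ?_⟩, ⟨trivial, ?_⟩, trivial⟩ <;>
        split_ifs <;> push_cast <;> ring

-- ===== VERDICT (by name: the statement is the Claim_ definition above) =====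
theorem count_feature_categories_spec : Claim_equal_count_feature_categories := by
  intro input_dict _
  unfold Spec_count_feature_categories count_feature_categories count_feature_categories_alt
  show (input_dict.foldl (fun d kv => kv.2.foldl pvStepA d)
          (PySem.Dict.mk [("HpHp", 0), ("HH", 0), ("MI", 0), ("H", 0), ("HH_jit", 0)])).items = _
  rw [pv_foldl_flat, pv_fold_counts]
  simp
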